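-- pv_equiv track=rewrite | github.com/MaX-Lo/ProjectEuler | 107_minimal_network.py | get_edges_sum
-- ===== SOURCE A (Python) =====
-- from copy import deepcopy
--
-- def get_edges_sum(edges):
--     tmp = deepcopy(edges)
--     res = 0
--     for v1 in range(len(tmp)):
--         for v2 in range(len(tmp)):
--            if tmp[v1][v2] == -1:
--                continue
--            else:
--                res += tmp[v1][v2]
--                tmp[v2][v1] = -1
--     return res
-- ===== SOURCE B (Python) =====
-- def get_edges_sum(edges):
--     n = len(edges)
--     res = 0
--     for v1 in range(n):
--         row = edges[v1]
--         for v2 in range(v1, n):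
--             u = row[v2]
--             if u != -1:
--                 res += u
--             elif v1 != v2:
--                 l = edges[v2][v1]
--                 if l != -1:
--                     res += l
--     return res
-- ===== Notes on version B (the rewrite author's own statement) =====
-- stated objective: simpler
-- what changed: B drops A's deepcopy and in-place marking entirely: instead of scanning all n^2 cells while mutating a copy to suppress symmetric duplicates, B makes one read-only pass over the upper triangle, taking edges[v1][v2] when it is not -1 and otherwise falling back to edges[v2][v1] for off-diagonal pairs.
import Mathlib
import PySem

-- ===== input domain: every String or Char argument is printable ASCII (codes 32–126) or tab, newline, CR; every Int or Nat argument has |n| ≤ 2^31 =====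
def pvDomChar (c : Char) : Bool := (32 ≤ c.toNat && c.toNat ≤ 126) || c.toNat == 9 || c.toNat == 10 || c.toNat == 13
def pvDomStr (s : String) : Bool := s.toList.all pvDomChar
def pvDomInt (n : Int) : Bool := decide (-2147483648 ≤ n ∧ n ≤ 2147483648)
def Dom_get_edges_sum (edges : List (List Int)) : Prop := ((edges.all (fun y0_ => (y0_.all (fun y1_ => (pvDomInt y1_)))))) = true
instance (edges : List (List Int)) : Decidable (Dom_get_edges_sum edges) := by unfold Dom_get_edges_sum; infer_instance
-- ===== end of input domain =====

-- B replaces A's deepcopy-and-mutate full-matrix scan by a read-only pass over the upper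
-- triangle only (with A's lower-triangle fallback when the upper entry is -1): simpler,
-- no copy, no mutation, half the cells visited.

-- ===== PORT A =====
-- body of A's inner loop, named so the proofs can speak about it
def pvStepL (v1 : Nat) (st : List (List Int) × Int) (v2 : Nat) : List (List Int) × Int :=
  let x := (st.1.getD v1 []).getD v2 0
  if x = -1 then st
  else (st.1.set v2 ((st.1.getD v2 []).set v1 (-1)), st.2 + x)

def get_edges_sum (edges : List (List Int)) : Int :=
  ((List.range edges.length).foldl
    (fun st v1 => (List.range edges.length).foldl (pvStepL v1) st)
    (edges, 0)).2

-- ===== PORT B =====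
def get_edges_sum_alt (edges : List (List Int)) : Int :=
  (List.range edges.length).foldl (fun res v1 =>
    let row := edges.getD v1 []
    (List.range' v1 (edges.length - v1)).foldl (fun res v2 =>
      let u := row.getD v2 0
      if u ≠ -1 then res + u
      else if v1 ≠ v2 then
        (if (edges.getD v2 []).getD v1 0 ≠ -1 then res + (edges.getD v2 []).getD v1 0 else res)
      else res) res) 0

-- ===== PRECONDITION & SPEC =====
-- Pre_ excludes exactly the inputs where A raises IndexError: some row shorter than len(edges).
def Pre_get_edges_sum (edges : List (List Int)) : Prop :=
  ∀ row ∈ edges, edges.length ≤ row.length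
instance (edges : List (List Int)) : Decidable (Pre_get_edges_sum edges) := by
  unfold Pre_get_edges_sum; infer_instance
def pvWitness_get_edges_sum : List (List Int) := [[1, -1], [2, 3]]

def Spec_get_edges_sum (edges : List (List Int)) (out : Int) : Prop := out = get_edges_sum_alt edges
instance (edges : List (List Int)) (out : Int) : Decidable (Spec_get_edges_sum edges out) := by
  unfold Spec_get_edges_sum; infer_instance

-- ===== CLAIM (what is proved, stated in full; the proofs are below) =====
def Claim_equal_get_edges_sum : Prop := ∀ (edges : List (List Int)), Dom_get_edges_sum edges → Pre_get_edges_sum edges → Spec_get_edges_sum edges (get_edges_sum edges)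

-- ===== LEMMAS AND PROOFS =====

-- the matrix as a total function
def pvE (edges : List (List Int)) : Nat → Nat → Int := fun r c => (edges.getD r []).getD c 0

-- functional update
def pvUpd (g : Nat → Nat → Int) (i j : Nat) (v : Int) : Nat → Nat → Int :=
  fun a b => if a = i ∧ b = j then v else g a b

-- A's inner-loop body on the functional state
def pvStepA (v1 : Nat) (st : (Nat → Nat → Int) × Int) (v2 : Nat) : (Nat → Nat → Int) × Int :=
  let x := st.1 v1 v2
  if x = -1 then st else (pvUpd st.1 v2 v1 (-1), st.2 + x)

-- state of A's tmp after k complete outer rows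
def pvMask (e : Nat → Nat → Int) (n k : Nat) : Nat → Nat → Int :=
  fun a b => if b < k ∧ a < n ∧ e b a ≠ -1 ∧ (a < b → e a b = -1) then -1 else e a b

-- state of A's tmp after k complete rows plus the first j columns of row k
def pvPart (e : Nat → Nat → Int) (n k j : Nat) : Nat → Nat → Int :=
  fun a b => if b = k ∧ a < j ∧ pvMask e n k k a ≠ -1 then -1 else pvMask e n k a b

-- what A adds at cell (r, c)
def pvContribA (e : Nat → Nat → Int) (r c : Nat) : Int :=
  if c < r ∧ e c r ≠ -1 then 0 else (if e r c = -1 then 0 else e r c)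

-- what B adds at upper-triangle cell (r, c), r ≤ c
def pvContribB (e : Nat → Nat → Int) (r c : Nat) : Int :=
  if e r c ≠ -1 then e r c else (if r ≠ c then (if e c r ≠ -1 then e c r else 0) else 0)

-- simulation relation between A's list state and the functional state
def pvRel (n : Nat) (tmp : List (List Int)) (g : Nat → Nat → Int) : Prop :=
  tmp.length = n ∧ (∀ r, r < n → n ≤ (tmp.getD r []).length) ∧
    (∀ r c, (tmp.getD r []).getD c 0 = g r c)

theorem pvGetD_set {α : Type} (l : List α) (i j : Nat) (v d : α) :
    (l.set i v).getD j d = if j = i ∧ i < l.length then v else l.getD j d := by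
  rcases Nat.lt_or_ge i l.length with h | h
  · by_cases hj : j = i
    · subst hj; simp [List.getD_eq_getElem?_getD, h]
    · simp [List.getD_eq_getElem?_getD, List.getElem?_set_ne (by omega : i ≠ j), hj]
  · rw [List.set_eq_of_length_le h]
    simp [show ¬(j = i ∧ i < l.length) by omega]

theorem pvRel_step (n : Nat) (tmp : List (List Int)) (g : Nat → Nat → Int)
    (res : Int) (v1 v2 : Nat) (hrel : pvRel n tmp g) (h1 : v1 < n) (h2 : v2 < n) :
    pvRel n (pvStepL v1 (tmp, res) v2).1 (pvStepA v1 (g, res) v2).1 ∧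
      (pvStepL v1 (tmp, res) v2).2 = (pvStepA v1 (g, res) v2).2 := by
  obtain ⟨hlen, hrow, hval⟩ := hrel
  have hx : (tmp.getD v1 []).getD v2 0 = g v1 v2 := hval v1 v2
  have hL : pvStepL v1 (tmp, res) v2 =
      if g v1 v2 = -1 then (tmp, res)
      else (tmp.set v2 ((tmp.getD v2 []).set v1 (-1)), res + g v1 v2) := by
    simp only [pvStepL, hx]
  have hA : pvStepA v1 (g, res) v2 =
      if g v1 v2 = -1 then (g, res) else (pvUpd g v2 v1 (-1), res + g v1 v2) := rfl
  rw [hL, hA]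
  by_cases hm : g v1 v2 = -1
  · rw [if_pos hm, if_pos hm]
    exact ⟨⟨hlen, hrow, hval⟩, rfl⟩
  · rw [if_neg hm, if_neg hm]
    have hset : v2 < tmp.length := by omega
    have hrl : n ≤ (tmp.getD v2 []).length := hrow v2 h2
    have hv1 : v1 < (tmp.getD v2 []).length := by omega
    refine ⟨⟨?_, ?_, ?_⟩, rfl⟩
    · simpa using hlen
    · intro r hr
      show n ≤ ((tmp.set v2 ((tmp.getD v2 []).set v1 (-1))).getD r []).length
      rw [pvGetD_set]
      by_cases h : r = v2
      · rw [if_pos ⟨h, hset⟩]; simpa using hrl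
      · rw [if_neg (by tauto)]; exact hrow r hr
    · intro r c
      show ((tmp.set v2 ((tmp.getD v2 []).set v1 (-1))).getD r []).getD c 0
          = pvUpd g v2 v1 (-1) r c
      simp only [pvUpd]
      rw [pvGetD_set]
      by_cases h : r = v2
      · rw [if_pos ⟨h, hset⟩]
        subst h
        rw [pvGetD_set]
        by_cases hc : c = v1
        · rw [if_pos ⟨hc, hv1⟩, if_pos ⟨rfl, hc⟩]
        · rw [if_neg (by tauto), if_neg (by tauto)]
          exact hval r c
      · rw [if_neg (by tauto), if_neg (by tauto)]
        exact hval r c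

theorem pvRel_inner (n : Nat) (cs : List Nat) (v1 : Nat) (h1 : v1 < n)
    (hcs : ∀ c ∈ cs, c < n) :
    ∀ (tmp : List (List Int)) (g : Nat → Nat → Int) (res : Int), pvRel n tmp g →
      pvRel n (cs.foldl (pvStepL v1) (tmp, res)).1 (cs.foldl (pvStepA v1) (g, res)).1 ∧
        (cs.foldl (pvStepL v1) (tmp, res)).2 = (cs.foldl (pvStepA v1) (g, res)).2 := by
  induction cs with
  | nil => intro tmp g res hrel; exact ⟨hrel, rfl⟩
  | cons c cs ih =>
    intro tmp g res hrel
    have hc : c < n := hcs c (List.mem_cons_self ..)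
    have step := pvRel_step n tmp g res v1 c hrel h1 hc
    simp only [List.foldl_cons]
    have : pvStepL v1 (tmp, res) c = ((pvStepL v1 (tmp, res) c).1, (pvStepL v1 (tmp, res) c).2) := rfl
    rw [this, step.2]
    have : pvStepA v1 (g, res) c = ((pvStepA v1 (g, res) c).1, (pvStepA v1 (g, res) c).2) := rfl
    rw [this]
    exact ih (fun x hx => hcs x (List.mem_cons_of_mem _ hx)) _ _ _ step.1

theorem pvRel_outer (n : Nat) (rs : List Nat) (hrs : ∀ r ∈ rs, r < n) :
    ∀ (tmp : List (List Int)) (g : Nat → Nat → Int) (res : Int), pvRel n tmp g →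
      pvRel n (rs.foldl (fun st v1 => (List.range n).foldl (pvStepL v1) st) (tmp, res)).1
        (rs.foldl (fun st v1 => (List.range n).foldl (pvStepA v1) st) (g, res)).1 ∧
      (rs.foldl (fun st v1 => (List.range n).foldl (pvStepL v1) st) (tmp, res)).2 =
        (rs.foldl (fun st v1 => (List.range n).foldl (pvStepA v1) st) (g, res)).2 := by
  induction rs with
  | nil => intro tmp g res hrel; exact ⟨hrel, rfl⟩
  | cons r rs ih =>
    intro tmp g res hrel
    have hr : r < n := hrs r (List.mem_cons_self ..)
    have step := pvRel_inner n (List.range n) r hr (by simp) tmp g res hrel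
    simp only [List.foldl_cons]
    rw [show (List.range n).foldl (pvStepL r) (tmp, res)
          = (((List.range n).foldl (pvStepL r) (tmp, res)).1,
             ((List.range n).foldl (pvStepL r) (tmp, res)).2) from rfl,
        step.2,
        show (List.range n).foldl (pvStepA r) (g, res)
          = (((List.range n).foldl (pvStepA r) (g, res)).1,
             ((List.range n).foldl (pvStepA r) (g, res)).2) from rfl]
    exact ih (fun x hx => hrs x (List.mem_cons_of_mem _ hx)) _ _ _ step.1

-- inner-loop helpers
theorem pvMask_read (e : Nat → Nat → Int) (n k : Nat) (hk : k < n) (j : Nat) :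
    pvMask e n k k j = if j < k ∧ e j k ≠ -1 then -1 else e k j := by
  simp only [pvMask]
  by_cases hc : j < k ∧ e j k ≠ -1
  · rw [if_pos ⟨hc.1, hk, hc.2, by intro h; exact absurd h (by omega)⟩, if_pos hc]
  · rw [if_neg (by rintro ⟨h1, -, h3, -⟩; exact hc ⟨h1, h3⟩), if_neg hc]

theorem pvPart_read (e : Nat → Nat → Int) (n k j : Nat) :
    pvPart e n k j k j = pvMask e n k k j := by
  simp only [pvPart]
  rw [if_neg (by rintro ⟨h1, h2, -⟩; omega)]

theorem pvPart_succ_skip (e : Nat → Nat → Int) (n k j : Nat) (h : pvMask e n k k j = -1) :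
    pvPart e n k j = pvPart e n k (j + 1) := by
  funext a b
  simp only [pvPart]
  by_cases hb : b = k
  · by_cases h3 : a < j ∧ pvMask e n k k a ≠ -1
    · rw [if_pos ⟨hb, h3.1, h3.2⟩, if_pos ⟨hb, by omega, h3.2⟩]
    · rw [if_neg (by rintro ⟨-, h4, h5⟩; exact h3 ⟨h4, h5⟩),
          if_neg (by
            rintro ⟨-, h4, h5⟩
            rcases Nat.lt_succ_iff_lt_or_eq.mp h4 with h6 | h6
            · exact h3 ⟨h6, h5⟩
            · exact h5 (by rw [h6]; exact h))]
  · rw [if_neg (by rintro ⟨hbk, -⟩; exact hb hbk), if_neg (by rintro ⟨hbk, -⟩; exact hb hbk)]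

theorem pvPart_succ_mark (e : Nat → Nat → Int) (n k j : Nat) (h : pvMask e n k k j ≠ -1) :
    pvUpd (pvPart e n k j) j k (-1) = pvPart e n k (j + 1) := by
  funext a b
  simp only [pvUpd, pvPart]
  by_cases hab : a = j ∧ b = k
  · rw [if_pos hab, if_pos ⟨hab.2, by omega, by rw [show a = j from hab.1]; exact h⟩]
  · rw [if_neg hab]
    by_cases hb : b = k
    · by_cases h3 : a < j ∧ pvMask e n k k a ≠ -1
      · rw [if_pos ⟨hb, h3.1, h3.2⟩, if_pos ⟨hb, by omega, h3.2⟩]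
      · rw [if_neg (by rintro ⟨-, h4, h5⟩; exact h3 ⟨h4, h5⟩),
            if_neg (by
              rintro ⟨-, h4, h5⟩
              rcases Nat.lt_succ_iff_lt_or_eq.mp h4 with h6 | h6
              · exact h3 ⟨h6, h5⟩
              · exact hab ⟨h6, hb⟩)]
    · rw [if_neg (by rintro ⟨hbk, -⟩; exact hb hbk), if_neg (by rintro ⟨hbk, -⟩; exact hb hbk)]

-- inner-loop invariant of the functional program
theorem pvInner_inv (e : Nat → Nat → Int) (n k : Nat) (hk : k < n) :
    ∀ (m j : Nat) (res : Int), j + m ≤ n →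
      (List.range' j m).foldl (pvStepA k) (pvPart e n k j, res) =
        (pvPart e n k (j + m), res + ((List.range' j m).map (pvContribA e k)).sum) := by
  intro m
  induction m with
  | zero => intro j res h; simp
  | succ m ih =>
    intro j res h
    rw [List.range'_succ, List.foldl_cons]
    have hread : pvPart e n k j k j = pvMask e n k k j := pvPart_read e n k j
    by_cases hx : pvMask e n k k j = -1
    · have hstep : pvStepA k (pvPart e n k j, res) j = (pvPart e n k j, res) := by
        simp [pvStepA, hread, hx]
      have hcontrib : pvContribA e k j = 0 := by
        rw [pvMask_read e n k hk j] at hx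
        simp only [pvContribA]
        by_cases hc : j < k ∧ e j k ≠ -1
        · rw [if_pos hc]
        · rw [if_neg hc]; rw [if_neg hc] at hx; rw [hx]; simp
      rw [hstep, pvPart_succ_skip e n k j hx, ih (j + 1) res (by omega),
          show j + 1 + m = j + (m + 1) from by omega]
      simp only [List.map_cons, List.sum_cons, hcontrib]
      exact Prod.ext_iff.mpr ⟨rfl, by ring⟩
    · have hstep : pvStepA k (pvPart e n k j, res) j =
          (pvUpd (pvPart e n k j) j k (-1), res + pvMask e n k k j) := by
        simp [pvStepA, hread, hx]
      have hcontrib : pvContribA e k j = pvMask e n k k j := by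
        rw [pvMask_read e n k hk j] at hx ⊢
        simp only [pvContribA]
        by_cases hc : j < k ∧ e j k ≠ -1
        · rw [if_pos hc] at hx; exact absurd rfl hx
        · rw [if_neg hc] at hx ⊢; rw [if_neg hx, if_neg hc]
      rw [hstep, pvPart_succ_mark e n k j hx, ih (j + 1) _ (by omega),
          show j + 1 + m = j + (m + 1) from by omega]
      simp only [List.map_cons, List.sum_cons, hcontrib]
      exact Prod.ext_iff.mpr ⟨rfl, by ring⟩

theorem pvPart_zero (e : Nat → Nat → Int) (n k : Nat) : pvPart e n k 0 = pvMask e n k := by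
  funext a b; simp [pvPart]

theorem pvPart_full (e : Nat → Nat → Int) (n k : Nat) (hk : k < n) :
    pvPart e n k n = pvMask e n (k + 1) := by
  funext a b
  by_cases hb : b = k
  · by_cases ha : a < n
    · have hmm := pvMask_read e n k hk a
      by_cases hcond : e k a ≠ -1 ∧ (a < k → e a k = -1)
      · have hne : pvMask e n k k a ≠ -1 := by
          rw [hmm, if_neg (by rintro ⟨h1, h2⟩; exact h2 (hcond.2 h1))]
          exact hcond.1
        have hL : pvPart e n k n a b = -1 := by
          simp only [pvPart]; rw [if_pos ⟨hb, ha, hne⟩]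
        have hR : pvMask e n (k + 1) a b = -1 := by
          simp only [pvMask]
          rw [if_pos ⟨by omega, ha, by rw [show b = k from hb]; exact hcond.1,
                by rw [show b = k from hb]; exact hcond.2⟩]
        rw [hL, hR]
      · have hm1 : pvMask e n k k a = -1 := by
          rw [hmm]
          by_cases hc : a < k ∧ e a k ≠ -1
          · rw [if_pos hc]
          · rw [if_neg hc]; tauto
        have hL : pvPart e n k n a b = pvMask e n k a b := by
          simp only [pvPart]
          rw [if_neg (by rintro ⟨-, -, hn⟩; exact hn hm1)]
        have hR : pvMask e n (k + 1) a b = pvMask e n k a b := by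
          simp only [pvMask]
          rw [if_neg (by
                rintro ⟨h1, h2, h3, h4⟩
                rw [show b = k from hb] at h3 h4
                exact hcond ⟨h3, h4⟩),
              if_neg (by rintro ⟨h1, -⟩; omega)]
        rw [hL, hR]
    · have hL : pvPart e n k n a b = e a b := by
        simp only [pvPart, pvMask]
        rw [if_neg (by rintro ⟨-, h2, -⟩; omega), if_neg (by rintro ⟨-, h2, -⟩; omega)]
      have hR : pvMask e n (k + 1) a b = e a b := by
        simp only [pvMask]
        rw [if_neg (by rintro ⟨-, h2, -⟩; omega)]
      rw [hL, hR]
  · have hL : pvPart e n k n a b = pvMask e n k a b := by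
      simp only [pvPart]
      rw [if_neg (by rintro ⟨h1, -⟩; exact hb h1)]
    rw [hL]
    simp only [pvMask]
    by_cases hc : b < k ∧ a < n ∧ e b a ≠ -1 ∧ (a < b → e a b = -1)
    · rw [if_pos hc, if_pos ⟨by omega, hc.2⟩]
    · rw [if_neg hc, if_neg (by rintro ⟨h1, h2⟩; exact hc ⟨by omega, h2⟩)]

theorem pvMask_zero (e : Nat → Nat → Int) (n : Nat) : pvMask e n 0 = e := by
  funext a b; simp [pvMask]

-- outer-loop invariant of the functional program
theorem pvOuter_inv (e : Nat → Nat → Int) (n : Nat) :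
    ∀ (m k : Nat) (res : Int), k + m ≤ n →
      (List.range' k m).foldl (fun st v1 => (List.range n).foldl (pvStepA v1) st)
          (pvMask e n k, res) =
        (pvMask e n (k + m),
          res + ((List.range' k m).map (fun r => ((List.range n).map (pvContribA e r)).sum)).sum) := by
  intro m
  induction m with
  | zero => intro k res h; simp
  | succ m ih =>
    intro k res h
    rw [List.range'_succ, List.foldl_cons]
    have hk : k < n := by omega
    have hinner := pvInner_inv e n k hk n 0 res (by omega)
    rw [pvPart_zero] at hinner
    simp only [Nat.zero_add] at hinner
    rw [pvPart_full e n k hk] at hinner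
    rw [← List.range_eq_range'] at hinner
    rw [hinner, ih (k + 1) _ (by omega),
        show k + 1 + m = k + (m + 1) from by omega]
    simp only [List.map_cons, List.sum_cons]
    exact Prod.ext_iff.mpr ⟨rfl, by ring⟩

-- fold-to-sum for B's inner loop
theorem pvFoldB (edges : List (List Int)) (v1 : Nat) (cs : List Nat) :
    ∀ res : Int,
      cs.foldl (fun res v2 =>
        let u := (edges.getD v1 []).getD v2 0
        if u ≠ -1 then res + u
        else if v1 ≠ v2 then
          (if (edges.getD v2 []).getD v1 0 ≠ -1 then res + (edges.getD v2 []).getD v1 0 else res)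
        else res) res =
      res + (cs.map (pvContribB (pvE edges) v1)).sum := by
  induction cs with
  | nil => intro res; simp
  | cons c cs ih =>
    intro res
    rw [List.foldl_cons, List.map_cons, List.sum_cons, ih]
    simp only [pvContribB, pvE]
    split_ifs <;> ring

-- list sums to Finset sums
theorem pvSumRange' (f : Nat → Int) : ∀ (m j : Nat),
    ((List.range' j m).map f).sum = ∑ c ∈ Finset.Ico j (j + m), f c := by
  intro m
  induction m with
  | zero => intro j; simp
  | succ m ih =>
    intro j
    rw [List.range'_succ, List.map_cons, List.sum_cons, ih (j + 1),
        show j + 1 + m = j + (m + 1) from by omega,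
        Finset.sum_eq_sum_Ico_succ_bot (by omega : j < j + (m + 1))]

theorem pvSumRange (f : Nat → Int) (n : Nat) :
    ((List.range n).map f).sum = ∑ c ∈ Finset.range n, f c := by
  rw [List.range_eq_range', pvSumRange' f n 0, Finset.range_eq_Ico,
      show 0 + n = n from by omega]

-- fold-to-sum for an accumulating loop
theorem pvFoldAdd (body : Int → Nat → Int) (F : Nat → Int)
    (h : ∀ res v, body res v = res + F v) :
    ∀ (l : List Nat) (init : Int), l.foldl body init = init + (l.map F).sum := by
  intro l
  induction l with
  | nil => intro init; simp
  | cons x xs ih =>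
    intro init
    rw [List.foldl_cons, h, ih, List.map_cons, List.sum_cons]
    ring

-- the triangle swap
theorem pvTriangle (f : Nat → Nat → Int) (n : Nat) :
    ∑ r ∈ Finset.range n, ∑ c ∈ Finset.range r, f r c =
      ∑ r ∈ Finset.range n, ∑ c ∈ Finset.Ico (r + 1) n, f c r := by
  induction n with
  | zero => simp
  | succ n ih =>
    rw [Finset.sum_range_succ, ih]
    have h1 : ∀ r ∈ Finset.range (n + 1), ∑ c ∈ Finset.Ico (r + 1) (n + 1), f c r =
        (if r < n then (∑ c ∈ Finset.Ico (r + 1) n, f c r) + f n r else 0) := by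
      intro r hr
      simp only [Finset.mem_range] at hr
      by_cases h : r < n
      · rw [if_pos h, Finset.sum_Ico_succ_top (by omega)]
      · rw [if_neg h]
        have : r = n := by omega
        subst this
        simp
    rw [Finset.sum_congr rfl h1, Finset.sum_range_succ, if_neg (by omega)]
    have h2 : ∀ r ∈ Finset.range n,
        (if r < n then (∑ c ∈ Finset.Ico (r + 1) n, f c r) + f n r else 0) =
        (∑ c ∈ Finset.Ico (r + 1) n, f c r) + f n r := by
      intro r hr
      simp only [Finset.mem_range] at hr
      rw [if_pos hr]
    rw [Finset.sum_congr rfl h2, Finset.sum_add_distrib]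
    ring

-- per-row relation between B's triangle contribution and A's contributions
theorem pvRowEq (e : Nat → Nat → Int) (n r : Nat) (hr : r < n) :
    ∑ c ∈ Finset.Ico r n, pvContribB e r c =
      (∑ c ∈ Finset.Ico r n, pvContribA e r c) + ∑ c ∈ Finset.Ico (r + 1) n, pvContribA e c r := by
  rw [Finset.sum_eq_sum_Ico_succ_bot (by omega : r < n) (pvContribB e r),
      Finset.sum_eq_sum_Ico_succ_bot (by omega : r < n) (pvContribA e r)]
  have hdiag : pvContribB e r r = pvContribA e r r := by
    simp only [pvContribB, pvContribA]
    split_ifs <;> simp_all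
  have hupper : ∀ c ∈ Finset.Ico (r + 1) n, pvContribB e r c =
      pvContribA e r c + pvContribA e c r := by
    intro c hc
    simp only [Finset.mem_Ico] at hc
    have h2 : r < c := by omega
    simp only [pvContribB, pvContribA]
    split_ifs <;> omega
  rw [hdiag, Finset.sum_congr rfl hupper, Finset.sum_add_distrib]
  ring

-- A's functional value as a double sum
theorem pvA_sum (edges : List (List Int)) (hpre : Pre_get_edges_sum edges) :
    get_edges_sum edges =
      ∑ r ∈ Finset.range edges.length, ∑ c ∈ Finset.range edges.length,
        pvContribA (pvE edges) r c := by
  have hrel0 : pvRel edges.length edges (pvE edges) := by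
    refine ⟨rfl, ?_, fun r c => rfl⟩
    intro r hr
    have hmem : edges.getD r [] ∈ edges := by
      rw [List.getD_eq_getElem?_getD, List.getElem?_eq_getElem hr]
      exact List.getElem_mem hr
    exact hpre _ hmem
  have hsim := pvRel_outer edges.length (List.range edges.length) (by simp)
      edges (pvE edges) 0 hrel0
  have hfun := pvOuter_inv (pvE edges) edges.length edges.length 0 0 (by omega)
  rw [pvMask_zero] at hfun
  rw [← List.range_eq_range'] at hfun
  unfold get_edges_sum
  rw [hsim.2, hfun]
  simp only [zero_add]
  rw [pvSumRange]
  refine Finset.sum_congr rfl fun r hr => ?_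
  rw [pvSumRange]

-- B's value as a triangle sum
theorem pvB_sum (edges : List (List Int)) :
    get_edges_sum_alt edges =
      ∑ r ∈ Finset.range edges.length, ∑ c ∈ Finset.Ico r edges.length,
        pvContribB (pvE edges) r c := by
  unfold get_edges_sum_alt
  rw [pvFoldAdd _
      (fun v1 => ((List.range' v1 (edges.length - v1)).map (pvContribB (pvE edges) v1)).sum)
      (fun res v1 => pvFoldB edges v1 (List.range' v1 (edges.length - v1)) res)]
  rw [zero_add, pvSumRange]
  refine Finset.sum_congr rfl fun r hr => ?_
  simp only [Finset.mem_range] at hr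
  rw [pvSumRange', show r + (edges.length - r) = edges.length from by omega]

-- ===== VERDICT (by name: the statement is the Claim_ definition above) =====
theorem get_edges_sum_spec : Claim_equal_get_edges_sum := by
  intro edges _ hpre
  unfold Spec_get_edges_sum
  rw [pvA_sum edges hpre, pvB_sum edges]
  have hsplit : ∀ r ∈ Finset.range edges.length,
      ∑ c ∈ Finset.range edges.length, pvContribA (pvE edges) r c =
        (∑ c ∈ Finset.range r, pvContribA (pvE edges) r c) +
          ∑ c ∈ Finset.Ico r edges.length, pvContribA (pvE edges) r c := by
    intro r hr
    simp only [Finset.mem_range] at hr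
    rw [Finset.range_eq_Ico,
        ← Finset.sum_Ico_consecutive _ (Nat.zero_le r) (by omega : r ≤ edges.length),
        ← Finset.range_eq_Ico]
  rw [Finset.sum_congr rfl hsplit, Finset.sum_add_distrib, pvTriangle,
      Finset.sum_congr rfl
        (fun r hr => pvRowEq (pvE edges) edges.length r (Finset.mem_range.mp hr)),
      Finset.sum_add_distrib]
  ring
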